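-- pv_equiv track=rewrite | github.com/AlbertMargaryan/Python_CPS109_Problems_Solution | problems-seperately/dominoCycle.py | dominoCycle
-- ===== SOURCE A (Python) =====
-- def dominoCycle(list):
--   isDomino = True
--   for i, v in enumerate(list):
--     if i == len(list) - 1:
--       if v[1] != list[0][0]:
--         isDomino = False
--         break
--     else:
--       if v[1] != list[i + 1][0]:
--         isDomino = False
--         break
--   return isDomino
-- ===== SOURCE B (Python) =====
-- def dominoCycle(list):
--     heads = [h for h, _ in list]
--     tails = [t for _, t in list]
--     return tails == heads[1:] + heads[:1]
-- ===== Notes on version B (the rewrite author's own statement) =====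
-- stated objective: idiomatic
-- what changed: Replaces A's single indexed loop with early break and a last-element special case by staged whole-list passes: project the head and tail columns separately and test one list equality between the tail column and the left-rotated head column.
import Mathlib
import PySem

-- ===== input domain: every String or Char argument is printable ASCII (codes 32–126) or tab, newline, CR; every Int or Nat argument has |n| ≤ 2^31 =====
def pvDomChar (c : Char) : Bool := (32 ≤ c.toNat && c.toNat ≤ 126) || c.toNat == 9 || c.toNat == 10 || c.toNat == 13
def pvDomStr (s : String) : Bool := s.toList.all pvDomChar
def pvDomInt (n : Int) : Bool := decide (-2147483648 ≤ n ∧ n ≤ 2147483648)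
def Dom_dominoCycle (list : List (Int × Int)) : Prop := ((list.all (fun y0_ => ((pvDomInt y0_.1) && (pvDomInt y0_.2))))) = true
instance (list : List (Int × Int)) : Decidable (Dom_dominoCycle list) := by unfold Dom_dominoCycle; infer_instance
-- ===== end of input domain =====

-- B replaces A's indexed loop with its last-element special case by staged
-- whole-list passes: project the head and tail columns and compare the tail
-- column with the left-rotated head column as one list equality (idiomatic).

-- ===== PORT A =====
-- the 'for i, v in enumerate(list)' loop with its early break
def dominoGoA (l : List (Int × Int)) : List (Int × (Int × Int)) → Bool
  | [] => true
  | (i, v) :: rest =>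
    if i = (l.length : Int) - 1 then
      if v.2 ≠ (PySem.List.pyGetD l 0 ((0 : Int), (0 : Int))).1 then false
      else dominoGoA l rest
    else
      if v.2 ≠ (PySem.List.pyGetD l (i + 1) ((0 : Int), (0 : Int))).1 then false
      else dominoGoA l rest

def dominoCycle (list : List (Int × Int)) : Bool :=
  dominoGoA list (PySem.List.enumerate list 0)

-- ===== PORT B =====
def dominoCycle_alt (list : List (Int × Int)) : Bool :=
  let heads := list.map (fun p => p.1)
  let tails := list.map (fun p => p.2)
  tails == heads.drop 1 ++ heads.take 1

-- ===== PRECONDITION & SPEC =====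
def Spec_dominoCycle (list : List (Int × Int)) (out : Bool) : Prop := out = dominoCycle_alt list
instance (list : List (Int × Int)) (out : Bool) : Decidable (Spec_dominoCycle list out) := by unfold Spec_dominoCycle; infer_instance

-- ===== CLAIM (what is proved, stated in full; the proofs are below) =====
def Claim_equal_dominoCycle : Prop := ∀ (list : List (Int × Int)), Dom_dominoCycle list → Spec_dominoCycle list (dominoCycle list)

-- ===== LEMMAS AND PROOFS =====

-- loop invariant: A's loop over the enumerated suffix equals the pairwise
-- check of that suffix against the rotated list restricted to it
theorem dominoGoA_zip (l : List (Int × Int)) :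
    ∀ (suf pre : List (Int × Int)), l = pre ++ suf →
    dominoGoA l (PySem.List.enumerate suf (pre.length : Int)) =
      ((suf.zip (l.drop (pre.length + 1) ++ l.take 1)).all (fun p => p.1.2 == p.2.1)) := by
  intro suf
  induction suf with
  | nil =>
    intro pre h
    simp [PySem.List.enumerate, dominoGoA]
  | cons v rest ih =>
    intro pre h
    have hdropk1 : l.drop (pre.length + 1) = rest := by
      subst h; simp [List.drop_append]
    rw [PySem.List.enumerate_cons]
    cases rest with
    | nil =>
      have hlen : l.length = pre.length + 1 := by subst h; simp
      have hcond : ((pre.length : Int) = (l.length : Int) - 1) := by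
        rw [hlen]; push_cast; ring
      have h0 : PySem.List.pyGetD l 0 ((0 : Int), (0 : Int)) = l.getD 0 ((0 : Int), (0 : Int)) := by
        simpa [List.getD] using
          (PySem.List.pyGetD_natCast l (0 : Nat) ((0 : Int), (0 : Int)))
      have htake : l.take 1 = [l.getD 0 ((0 : Int), (0 : Int))] := by
        cases l with
        | nil => simp at hlen
        | cons a as => simp [List.getD]
      simp only [dominoGoA, if_pos hcond, h0, hdropk1, htake]
      by_cases hv : v.2 = (l.getD 0 ((0 : Int), (0 : Int))).1
      · simp [hv, PySem.List.enumerate, dominoGoA, List.getD]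
      · simp [dominoGoA, List.getD, Lean.Grind.beq_eq_decide_eq]
    | cons w rest' =>
      have hlen : pre.length + 2 ≤ l.length := by subst h; simp
      have hcond : ¬ ((pre.length : Int) = (l.length : Int) - 1) := by
        intro hc; omega
      have hw : PySem.List.pyGetD l ((pre.length : Int) + 1) ((0 : Int), (0 : Int)) = w := by
        have hcast : ((pre.length : Int) + 1) = ((pre.length + 1 : Nat) : Int) := by push_cast; ring
        rw [hcast, PySem.List.pyGetD_natCast]
        have hsome : l[pre.length + 1]? = some w := by
          have h1 : (l.drop (pre.length + 1))[0]? = some w := by rw [hdropk1]; rfl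
          simpa using h1
        simp [List.getD, hsome]
      simp only [dominoGoA, if_neg hcond, hw, hdropk1]
      by_cases hv : v.2 = w.1
      · have hIH := ih (pre ++ [v]) (by simpa using h)
        have hstart : ((pre ++ [v]).length : Int) = (pre.length : Int) + 1 := by
          simp
        have hdrop2 : l.drop ((pre ++ [v]).length + 1) = rest' := by
          subst h
          simp only [List.drop_append]
          rw [List.drop_eq_nil_of_le (by omega)]
          simp [show pre.length + 1 + 1 - pre.length = 2 from by omega]
        rw [hstart, hdrop2] at hIH
        rw [PySem.List.enumerate_cons] at hIH
        simp [hv, hIH]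
      · simp [hv]

-- for equal-length lists, column equality equals the elementwise zip check
theorem map_eq_zip_all (l m : List (Int × Int)) (h : l.length = m.length) :
    ((l.map (fun p => p.2)) == (m.map (fun p => p.1))) =
      ((l.zip m).all (fun p => p.1.2 == p.2.1)) := by
  induction l generalizing m with
  | nil => cases m with
    | nil => rfl
    | cons b bs => simp at h
  | cons a as ih =>
    cases m with
    | nil => simp at h
    | cons b bs =>
      have h' : as.length = bs.length := by simpa using h
      have h2 := ih bs h'
      simp only [List.map_cons, List.zip_cons_cons, List.all_cons, List.cons_beq_cons]
      rw [h2]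

theorem dominoCycle_spec : Claim_equal_dominoCycle := by
  intro l _
  unfold Spec_dominoCycle dominoCycle dominoCycle_alt
  have h := dominoGoA_zip l l [] (by simp)
  simp only [List.length_nil, Nat.cast_zero, Nat.zero_add, Nat.zero_add] at h
  rw [h]
  have hlen : l.length = (l.drop 1 ++ l.take 1).length := by
    simp; omega
  rw [← map_eq_zip_all l (l.drop 1 ++ l.take 1) hlen]
  simp [List.map_append, List.map_drop, List.map_take]
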